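-- pv_equiv track=rewrite | github.com/lschachter/AdventOfCode | 2018/Day_05/breakdownPolymer.py | findSmallestPolymer
-- ===== SOURCE A (Python) =====
-- def breakdownPolymer(polymer):
-- 	polyLen = len(polymer)
-- 	pointer = 0
--
-- 	while pointer < polyLen - 1:
-- 		if polymer[pointer] == flipped(polymer[pointer + 1]):
-- 			polymer.pop(pointer)
-- 			polymer.pop(pointer)
-- 			polyLen -= 2
-- 			pointer = max(0, pointer - 1)
-- 		else:
-- 			pointer += 1
--
-- 	return polymer
--
-- def flipped(char):
-- 	return char.upper() if char.islower() else char.lower()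
--
-- def findSmallestPolymer(polymer):
-- 	units = set(polymer.lower())
--
-- 	minPolymer = len(polymer)
-- 	minEl = polymer[0]
--
-- 	for unit in units:
-- 		newPolymer = polymer.replace(unit, "")
-- 		newPolymer = newPolymer.replace(unit.upper(), "")
-- 		lenNewPolymer = len(breakdownPolymer(list(newPolymer)))
-- 		if lenNewPolymer < minPolymer:
-- 			minPolymer = lenNewPolymer
-- 			minEl = unit
--
-- 	return minPolymer
-- ===== SOURCE B (Python) =====
-- def findSmallestPolymer(polymer):
--     def flip(c):
--         return c.upper() if c.islower() else c.lower()
--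
--     def reduced_len(chars):
--         stack = []
--         for c in chars:
--             if stack and stack[-1] == flip(c):
--                 stack.pop()
--             else:
--                 stack.append(c)
--         return len(stack)
--
--     best = len(polymer)
--     for unit in set(polymer.lower()):
--         n = reduced_len(c for c in polymer if c.lower() != unit)
--         if n < best:
--             best = n
--     return best
-- ===== Notes on version B (the rewrite author's own statement) =====
-- stated objective: alternative
-- what changed: Replaces the pointer-walk that repeatedly pops two elements out of the list (re-shifting the tail, backing the pointer up; quadratic when many pairs cancel) with a single-pass stack reduction per candidate unit, and the two str.replace passes with one filter.
import Mathlib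
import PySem

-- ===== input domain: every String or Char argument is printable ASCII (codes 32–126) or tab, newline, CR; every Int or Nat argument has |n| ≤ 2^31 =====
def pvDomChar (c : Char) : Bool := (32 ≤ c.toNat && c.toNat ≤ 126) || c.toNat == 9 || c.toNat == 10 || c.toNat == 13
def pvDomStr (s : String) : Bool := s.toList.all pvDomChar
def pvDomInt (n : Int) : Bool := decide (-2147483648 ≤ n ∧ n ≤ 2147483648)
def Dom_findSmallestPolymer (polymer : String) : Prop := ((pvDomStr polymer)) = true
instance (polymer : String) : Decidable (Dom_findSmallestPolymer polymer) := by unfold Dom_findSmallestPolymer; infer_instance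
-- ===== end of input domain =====

-- B replaces A's pointer-walk reduction (list.pop twice per match, pointer backup) by a
-- single-pass stack reduction per candidate unit, and the two str.replace passes by one filter.
-- A mutates the list it builds inside breakdownPolymer, but that list is local to the call,
-- so the caller observes no mutation; the equivalence is about the return value.


-- ===== PORT A =====
-- flipped(char): char.upper() if char.islower() else char.lower()
def flippedA (c : Char) : Char :=
  if PySem.Chars.islower c then PySem.Chars.upperChar c else PySem.Chars.lowerChar c

-- the 'while pointer < polyLen - 1' loop of breakdownPolymer; Nat 'pointer - 1' is Python's max(0, pointer - 1)
def bdLoop (polymer : List Char) (pointer : Nat) : List Char :=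
  if h : pointer + 1 < polymer.length then
    if polymer[pointer]'(Nat.lt_of_succ_lt h) = flippedA (polymer[pointer + 1]'h) then
      -- polymer.pop(pointer); polymer.pop(pointer)
      bdLoop ((polymer.eraseIdx pointer).eraseIdx pointer) (pointer - 1)
    else
      bdLoop polymer (pointer + 1)
  else polymer
termination_by polymer.length * 2 - pointer
decreasing_by
  · simp only [List.length_eraseIdx]
    split_ifs <;> omega
  · omega

def breakdownPolymer (polymer : List Char) : List Char := bdLoop polymer 0

def findSmallestPolymer (polymer : String) : Int :=
  let units : PySem.Set Char := PySem.Set.ofList (PySem.Chars.lower polymer.toList)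
  -- minPolymer = len(polymer); minEl = polymer[0]  (Option Char: none is Python's IndexError on "")
  let init : Int × Option Char := ((PySem.Str.len polymer : Int), PySem.Str.pyGet? polymer 0)
  let res := units.foldl (fun acc unit =>
    let newPolymer := PySem.Chars.replace polymer.toList [unit] []
    let newPolymer := PySem.Chars.replace newPolymer [PySem.Chars.upperChar unit] []
    let lenNewPolymer : Int := ((breakdownPolymer newPolymer).length : Int)
    if lenNewPolymer < acc.1 then (lenNewPolymer, some unit) else acc) init
  res.1

-- ===== PORT B =====
def flipB (c : Char) : Char :=
  if PySem.Chars.islower c then PySem.Chars.upperChar c else PySem.Chars.lowerChar c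

-- the stack loop of reduced_len; head of the list is the top of the stack
def redLoop (stack : List Char) (input : List Char) : List Char :=
  match input with
  | [] => stack
  | c :: rest =>
    match stack with
    | t :: s => if t = flipB c then redLoop s rest else redLoop (c :: t :: s) rest
    | [] => redLoop [c] rest

def reducedLen (chars : List Char) : Int := ((redLoop [] chars).length : Int)

def findSmallestPolymer_alt (polymer : String) : Int :=
  let units : PySem.Set Char := PySem.Set.ofList (PySem.Chars.lower polymer.toList)
  units.foldl (fun best unit =>
    let n := reducedLen (polymer.toList.filter (fun c => PySem.Chars.lowerChar c != unit))
    if n < best then n else best) ((PySem.Str.len polymer : Int))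

-- ===== PRECONDITION & SPEC =====
-- Pre_ excludes only the empty string, on which A raises IndexError when reading the first character.
def Pre_findSmallestPolymer (polymer : String) : Prop := polymer ≠ ""
instance (polymer : String) : Decidable (Pre_findSmallestPolymer polymer) := by unfold Pre_findSmallestPolymer; infer_instance
def pvWitness_findSmallestPolymer : String := "dabAcCaCBAcCcaDA"

def Spec_findSmallestPolymer (polymer : String) (out : Int) : Prop := out = findSmallestPolymer_alt polymer
instance (polymer : String) (out : Int) : Decidable (Spec_findSmallestPolymer polymer out) := by unfold Spec_findSmallestPolymer; infer_instance

-- ===== CLAIM (what is proved, stated in full; the proofs are below) =====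
def Claim_equal_findSmallestPolymer : Prop := ∀ (polymer : String), Dom_findSmallestPolymer polymer → Pre_findSmallestPolymer polymer → Spec_findSmallestPolymer polymer (findSmallestPolymer polymer)

-- ===== LEMMAS AND PROOFS =====

-- characters: order and equality via codepoints
theorem charLe (c d : Char) : (c ≤ d) ↔ c.toNat ≤ d.toNat := by
  rw [Char.le_def, UInt32.le_iff_toNat_le]; rfl

theorem charEq (c d : Char) : (c = d) ↔ c.toNat = d.toNat := by
  constructor
  · intro h; rw [h]
  · intro h; exact Char.ext (UInt32.toNat_inj.mp h)

theorem toNat_ofNat_small (n : Nat) (h : n < 55296) : (Char.ofNat n).toNat = n := by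
  rw [Char.ofNat, dif_pos (Or.inl h)]
  simp [Char.ofNatAux, Char.toNat, UInt32.toNat_ofNatLT]

theorem lowerChar_toNat (c : Char) (h : c.toNat < 55000) :
    (PySem.Chars.lowerChar c).toNat = if 65 ≤ c.toNat ∧ c.toNat ≤ 90 then c.toNat + 32 else c.toNat := by
  unfold PySem.Chars.lowerChar PySem.Chars.isupper
  have h1 : ('A' ≤ c) ↔ 65 ≤ c.toNat := charLe 'A' c
  have h2 : (c ≤ 'Z') ↔ c.toNat ≤ 90 := charLe c 'Z'
  split_ifs with g1 g2 g2 <;>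
    simp only [Bool.and_eq_true, decide_eq_true_eq, h1, h2, not_and, not_le] at g1 <;>
    first
      | (rw [toNat_ofNat_small (c.toNat + 32) (by omega)] <;> omega)
      | omega

theorem upperChar_toNat (c : Char) :
    (PySem.Chars.upperChar c).toNat = if 97 ≤ c.toNat ∧ c.toNat ≤ 122 then c.toNat - 32 else c.toNat := by
  unfold PySem.Chars.upperChar PySem.Chars.islower
  have h1 : ('a' ≤ c) ↔ 97 ≤ c.toNat := charLe 'a' c
  have h2 : (c ≤ 'z') ↔ c.toNat ≤ 122 := charLe c 'z'
  split_ifs with g1 g2 g2 <;>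
    simp only [Bool.and_eq_true, decide_eq_true_eq, h1, h2, not_and, not_le] at g1 <;>
    first
      | (rw [toNat_ofNat_small (c.toNat - 32) (by omega)] <;> omega)
      | omega

-- per-character content of A's two replace passes vs B's single lower-filter
theorem char_filter_iff (c d : Char) (hc : pvDomChar c = true) (hd : pvDomChar d = true) :
    ((c ≠ PySem.Chars.lowerChar d ∧ c ≠ PySem.Chars.upperChar (PySem.Chars.lowerChar d)) ↔
      PySem.Chars.lowerChar c ≠ PySem.Chars.lowerChar d) := by
  simp only [pvDomChar, Bool.or_eq_true, Bool.and_eq_true, decide_eq_true_eq, beq_iff_eq] at hc hd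
  have hnu := lowerChar_toNat d (by omega)
  have hup := upperChar_toNat (PySem.Chars.lowerChar d)
  have hlc := lowerChar_toNat c (by omega)
  rw [ne_eq, ne_eq, ne_eq, charEq c (PySem.Chars.lowerChar d),
      charEq c (PySem.Chars.upperChar (PySem.Chars.lowerChar d)),
      charEq (PySem.Chars.lowerChar c) (PySem.Chars.lowerChar d), hup, hlc, hnu]
  split_ifs <;> omega

-- str.replace with a one-char pattern and empty replacement is a filter
theorem go_single (u : Char) : ∀ (fuel : Nat) (l acc : List Char), l.length ≤ fuel →
    PySem.Chars.replace.go [u] [] fuel l acc = acc.reverse ++ l.filter (fun c => c != u) := by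
  intro fuel
  induction fuel with
  | zero =>
    intro l acc h
    have : l = [] := List.eq_nil_of_length_eq_zero (Nat.le_zero.mp h)
    subst this
    rw [PySem.Chars.replace.go]
    simp
  | succ n ih =>
    intro l acc h
    match l with
    | [] => rw [PySem.Chars.replace.go] <;> simp
    | c :: t =>
      rw [PySem.Chars.replace.go]
      by_cases hc : c = u
      · subst hc
        have hp : [c].isPrefixOf (c :: t) = true := by simp [List.isPrefixOf]
        rw [if_pos hp]
        simp only [List.length_cons] at h
        rw [ih _ _ (by simpa using Nat.le_of_succ_le_succ h)]
        simp
      · have hp : [u].isPrefixOf (c :: t) = false := by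
          simp [List.isPrefixOf]; exact fun h' => absurd h'.symm hc
        rw [if_neg (by simp [hp])]
        simp only [List.length_cons] at h
        rw [ih _ _ (Nat.le_of_succ_le_succ h)]
        simp [hc]

theorem replace_single (cs : List Char) (u : Char) :
    PySem.Chars.replace cs [u] [] = cs.filter (fun c => c != u) := by
  rw [PySem.Chars.replace]
  simp [go_single u cs.length cs [] (le_refl _)]

-- A's pointer-walk on stack ++ rest equals B's stack reduction
theorem bd_nil (s : List Char) : bdLoop (s.reverse ++ []) (s.length - 1) = (redLoop s []).reverse := by
  rw [bdLoop]
  have : ¬ (s.length - 1 + 1 < (s.reverse ++ []).length) := by simp; omega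
  rw [dif_neg this]
  simp [redLoop]

theorem bd_red : ∀ (n : Nat) (r s : List Char), r.length ≤ n → s ≠ [] →
    bdLoop (s.reverse ++ r) (s.length - 1) = (redLoop s r).reverse := by
  intro n
  induction n with
  | zero =>
    intro r s h _
    have : r = [] := List.eq_nil_of_length_eq_zero (Nat.le_zero.mp h)
    subst this
    exact bd_nil s
  | succ n ih =>
    intro r s h hs
    match r with
    | [] => exact bd_nil s
    | c :: r' =>
      match s with
      | a :: s' =>
        have hl : (a :: s').reverse ++ c :: r' = s'.reverse ++ (a :: c :: r') := by simp
        have hp : (a :: s').length - 1 = s'.length := by simp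
        rw [hl, hp, bdLoop]
        have hlen : s'.length + 1 < (s'.reverse ++ (a :: c :: r')).length := by simp
        rw [dif_pos hlen]
        have hg1 : (s'.reverse ++ (a :: c :: r'))[s'.length]'(Nat.lt_of_succ_lt hlen) = a := by
          rw [List.getElem_append_right (by simp)]
          simp
        have hg2 : (s'.reverse ++ (a :: c :: r'))[s'.length + 1]'hlen = c := by
          rw [List.getElem_append_right (by simp)]
          simp
        rw [hg1, hg2]
        by_cases hm : a = flippedA c
        · rw [if_pos hm]
          have he : ((s'.reverse ++ (a :: c :: r')).eraseIdx s'.length).eraseIdx s'.length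
              = s'.reverse ++ r' := by
            rw [List.eraseIdx_append_of_length_le (by simp)]
            simp only [List.length_reverse, Nat.sub_self, List.eraseIdx]
            rw [List.eraseIdx_append_of_length_le (by simp)]
            simp
          rw [he]
          have hrhs : redLoop (a :: s') (c :: r') = redLoop s' r' := by
            rw [redLoop]
            simp only [if_pos (show a = flipB c from hm)]
          rw [hrhs]
          match s' with
          | b :: s'' =>
            exact ih r' (b :: s'') (by simp at h ⊢; omega) (by simp)
          | [] =>
            simp only [List.reverse_nil, List.nil_append, List.length_nil, Nat.zero_sub]
            match r' with
            | [] =>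
              rw [bdLoop]
              simp [redLoop]
            | d :: r'' =>
              have key : bdLoop ([d].reverse ++ r'') ([d].length - 1) = (redLoop [d] r'').reverse :=
                ih r'' [d] (by simp at h ⊢; omega) (by simp)
              simp only [List.reverse_cons, List.reverse_nil, List.nil_append,
                List.length_cons, List.length_nil] at key
              rw [show ([d] ++ r'' : List Char) = d :: r'' from rfl,
                 Nat.add_sub_cancel] at key
              rw [key]
              have hstep : redLoop [] (d :: r'') = redLoop [d] r'' := by rw [redLoop]
              rw [hstep]
        · rw [if_neg hm]
          have hl2 : s'.reverse ++ (a :: c :: r') = (c :: a :: s').reverse ++ r' := by simp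
          have hp2 : s'.length + 1 = (c :: a :: s').length - 1 := by simp
          rw [hl2, hp2, ih r' (c :: a :: s') (by simp at h ⊢; omega) (by simp)]
          have hstep2 : redLoop (a :: s') (c :: r') = redLoop (c :: a :: s') r' := by
            rw [redLoop]
            simp only [if_neg (show ¬ a = flipB c from hm)]
          rw [hstep2]

theorem breakdown_eq (l : List Char) : breakdownPolymer l = (redLoop [] l).reverse := by
  match l with
  | [] =>
    rw [breakdownPolymer, bdLoop]
    simp [redLoop]
  | c :: rest =>
    rw [breakdownPolymer]
    have key := bd_red rest.length rest [c] (le_refl _) (by simp)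
    simp only [List.reverse_cons, List.reverse_nil, List.nil_append,
      List.length_cons, List.length_nil] at key
    rw [show ([c] ++ rest : List Char) = c :: rest from rfl, Nat.add_sub_cancel] at key
    rw [key]
    have hstep : redLoop [] (c :: rest) = redLoop [c] rest := by rw [redLoop]
    rw [hstep]

-- projecting A's (min, argmin) fold onto B's min fold
theorem fold_proj (f g : Char → Int) : ∀ (us : List Char) (m : Int) (e : Option Char),
    (∀ u ∈ us, f u = g u) →
    (us.foldl (fun acc u => if f u < acc.1 then (f u, some u) else acc) (m, e)).1
      = us.foldl (fun b u => if g u < b then g u else b) m := by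
  intro us
  induction us with
  | nil => intro m e _; rfl
  | cons u us ih =>
    intro m e hpt
    have hu : f u = g u := hpt u (by simp)
    simp only [List.foldl_cons, hu]
    by_cases hlt : g u < m
    · rw [if_pos hlt, if_pos hlt]
      exact ih (g u) (some u) (fun v hv => hpt v (by simp [hv]))
    · rw [if_neg hlt, if_neg hlt]
      exact ih m e (fun v hv => hpt v (by simp [hv]))

-- per-unit: A's replace-replace-breakdown length equals B's filter-stack length
theorem per_unit (polymer : String) (hdom : Dom_findSmallestPolymer polymer)
    (u : Char) (hu : u ∈ PySem.Set.ofList (PySem.Chars.lower polymer.toList)) :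
    ((breakdownPolymer (PySem.Chars.replace (PySem.Chars.replace polymer.toList [u] [])
        [PySem.Chars.upperChar u] [])).length : Int)
      = reducedLen (polymer.toList.filter (fun c => PySem.Chars.lowerChar c != u)) := by
  have hdom' : ∀ c ∈ polymer.toList, pvDomChar c = true := by
    intro c hc
    unfold Dom_findSmallestPolymer pvDomStr at hdom
    exact List.all_eq_true.mp hdom c hc
  obtain ⟨d, hd, hud⟩ : ∃ d ∈ polymer.toList, PySem.Chars.lowerChar d = u := by
    have := (PySem.Set.mem_ofList _ u).mp hu
    unfold PySem.Chars.lower at this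
    simpa using this
  have hfil : PySem.Chars.replace (PySem.Chars.replace polymer.toList [u] [])
      [PySem.Chars.upperChar u] []
      = polymer.toList.filter (fun c => PySem.Chars.lowerChar c != u) := by
    rw [replace_single, replace_single, List.filter_filter]
    apply List.filter_congr
    intro c hc
    have hiff := char_filter_iff c d (hdom' c hc) (hdom' d hd)
    rw [hud] at hiff
    rw [Bool.eq_iff_iff]
    simp only [Bool.and_eq_true, bne_iff_ne, ne_eq]
    constructor
    · intro ⟨x, y⟩; exact hiff.mp ⟨y, x⟩
    · intro hx; have := hiff.mpr hx; exact ⟨this.2, this.1⟩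
  rw [hfil, breakdown_eq, reducedLen]
  simp

-- ===== VERDICT (by name: the statement is the Claim_ definition above) =====
theorem findSmallestPolymer_spec : Claim_equal_findSmallestPolymer := by
  intro polymer hdom _
  unfold Spec_findSmallestPolymer findSmallestPolymer findSmallestPolymer_alt
  exact fold_proj _ _ _ _ _ (fun u hu => per_unit polymer hdom u hu)
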